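-- pv_equiv track=rewrite | github.com/Peter200lx/advent-of-code | 2017/day20.py | find_lowest_acc
-- ===== SOURCE A (Python) =====
-- from typing import List, Tuple
--
-- def find_lowest_acc(part_list: List[Tuple[Tuple[int, int, int]]]) -> List[int]:
--     lowest_acc = sum(map(abs, part_list[0][2]))
--     lowest_list = []
--     for i, part in enumerate(part_list):
--         man_dist = sum(map(abs, part[2]))
--         if man_dist == lowest_acc:
--             lowest_list.append(i)
--         elif man_dist < lowest_acc:
--             lowest_acc = man_dist
--             lowest_list = [i]
--     return lowest_list
-- ===== SOURCE B (Python) =====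
-- from typing import List, Tuple
--
-- def find_lowest_acc(part_list: List[Tuple[Tuple[int, int, int]]]) -> List[int]:
--     dists = [sum(map(abs, p[2])) for p in part_list]
--     m = min(dists)
--     return [i for i, d in enumerate(dists) if d == m]
-- ===== Notes on version B (the rewrite author's own statement) =====
-- stated objective: idiomatic
-- what changed: Replaces the single running-min loop with mutable state (current minimum plus a list that is appended to or reset) by a compute-all-distances / min / filter decomposition in three comprehensions.
import Mathlib
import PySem

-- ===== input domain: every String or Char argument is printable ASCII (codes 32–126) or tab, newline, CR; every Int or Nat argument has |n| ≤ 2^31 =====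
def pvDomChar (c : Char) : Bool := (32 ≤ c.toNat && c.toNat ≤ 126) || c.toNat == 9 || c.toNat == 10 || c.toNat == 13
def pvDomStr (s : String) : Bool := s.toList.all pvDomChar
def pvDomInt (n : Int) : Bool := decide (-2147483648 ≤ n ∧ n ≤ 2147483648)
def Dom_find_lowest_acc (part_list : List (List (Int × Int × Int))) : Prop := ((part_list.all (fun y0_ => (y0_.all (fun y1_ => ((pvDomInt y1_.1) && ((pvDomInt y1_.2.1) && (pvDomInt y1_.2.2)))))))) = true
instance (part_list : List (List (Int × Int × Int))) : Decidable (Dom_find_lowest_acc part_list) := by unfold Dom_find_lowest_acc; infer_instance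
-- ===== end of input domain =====

-- B replaces A's running-min loop with mutable state by a distances / min / filter decomposition.

-- ===== PORT A =====
-- sum(map(abs, part[2])) : Manhattan distance of the acceleration triple part[2]
-- (outside Pre_ the index is out of range — Python raises IndexError there; the getD default is never used inside Pre_)
def pvManDist (part : List (Int × Int × Int)) : Int :=
  match PySem.List.pyGet? part 2 with
  | some (a, b, c) => |a| + |b| + |c|
  | none => 0

def find_lowest_acc (part_list : List (List (Int × Int × Int))) : List Int :=
  let lowest_acc := pvManDist ((PySem.List.pyGet? part_list 0).getD [])
  let lowest_list : List Int := []
  let res := (PySem.List.enumerate part_list 0).foldl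
    (fun (st : Int × List Int) (ip : Int × List (Int × Int × Int)) =>
      let man_dist := pvManDist ip.2
      if man_dist = st.1 then (st.1, st.2 ++ [ip.1])
      else if man_dist < st.1 then (man_dist, [ip.1])
      else st)
    (lowest_acc, lowest_list)
  res.2

-- ===== PORT B =====
def find_lowest_acc_alt (part_list : List (List (Int × Int × Int))) : List Int :=
  let dists := part_list.map pvManDist
  let m := (PySem.List.min? dists (fun x => x)).getD 0
  (PySem.List.enumerate dists 0).foldl
    (fun acc id_ => if id_.2 = m then acc ++ [id_.1] else acc) []

-- ===== PRECONDITION & SPEC =====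
-- Pre_ excludes exactly the inputs where Python A raises IndexError:
-- an empty part_list, or any particle with fewer than 3 components (no part[2]).
def Pre_find_lowest_acc (part_list : List (List (Int × Int × Int))) : Prop :=
  part_list ≠ [] ∧ ∀ p ∈ part_list, 3 ≤ p.length
instance (part_list : List (List (Int × Int × Int))) : Decidable (Pre_find_lowest_acc part_list) := by
  unfold Pre_find_lowest_acc; infer_instance
def pvWitness_find_lowest_acc : (List (List (Int × Int × Int))) :=
  [[(1, 0, 0), (0, 1, 0), (2, -1, 0)], [(0, 0, 0), (0, 0, 0), (1, 1, 1)]]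
def Spec_find_lowest_acc (part_list : List (List (Int × Int × Int))) (out : List Int) : Prop :=
  out = find_lowest_acc_alt part_list
instance (part_list : List (List (Int × Int × Int))) (out : List Int) : Decidable (Spec_find_lowest_acc part_list out) := by
  unfold Spec_find_lowest_acc; infer_instance

-- ===== CLAIM =====
def Claim_equal_find_lowest_acc : Prop :=
  ∀ (part_list : List (List (Int × Int × Int))), Dom_find_lowest_acc part_list →
    Pre_find_lowest_acc part_list →
    Spec_find_lowest_acc part_list (find_lowest_acc part_list)

-- ===== LEMMAS AND PROOFS =====

-- generic step of A's running-min loop, on (index, distance) pairs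
def pvStep (st : Int × List Int) (p : Int × Int) : Int × List Int :=
  if p.2 = st.1 then (st.1, st.2 ++ [p.1])
  else if p.2 < st.1 then (p.2, [p.1])
  else st

-- characterisation of A's loop: running min + indices achieving it
theorem pvStep_foldl (xs : List (Int × Int)) (cur : Int) (lst : List Int) :
    xs.foldl pvStep (cur, lst)
      = (xs.foldl (fun m p => min m p.2) cur,
         (if xs.foldl (fun m p => min m p.2) cur = cur then lst else []) ++
           (xs.filter (fun p => p.2 = xs.foldl (fun m p => min m p.2) cur)).map (fun p => p.1)) := by
  induction xs generalizing cur lst with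
  | nil => simp
  | cons hd tl ih =>
    obtain ⟨i, d⟩ := hd
    have hmin : ∀ (t : List (Int × Int)) (c : Int), List.foldl (fun m p => min m p.2) c t ≤ c := by
      intro t
      induction t with
      | nil => intro c; simp
      | cons h t iht =>
        intro c
        exact le_trans (iht _) (by simp)
    simp only [List.foldl_cons, pvStep, List.filter_cons]
    by_cases h1 : d = cur
    · subst h1
      rw [if_pos rfl, ih]; simp only [min_self]
      by_cases hM : List.foldl (fun m p => min m p.2) d tl = d
      · simp [hM]
      · have h2 : ¬ (d = List.foldl (fun m p => min m p.2) d tl) := fun he => hM he.symm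
        simp [hM, h2]
    · by_cases h2 : d < cur
      · rw [if_neg h1, if_pos h2, ih]
        have hmd : min cur d = d := by omega
        simp only [hmd]
        have hlt : List.foldl (fun m p => min m p.2) d tl ≠ cur := by
          have := hmin tl d; omega
        by_cases hM : List.foldl (fun m p => min m p.2) d tl = d
        · simp [hM, h1]
        · have h3 : ¬ (d = List.foldl (fun m p => min m p.2) d tl) := fun he => hM he.symm
          simp [hM, h3, hlt]
      · rw [if_neg h1, if_neg h2, ih]
        have hmd : min cur d = cur := by omega
        simp only [hmd]
        have h3 : ¬ (d = List.foldl (fun m p => min m p.2) cur tl) := by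
          have := hmin tl cur; omega
        simp [h3]

-- B's filter loop: appending exactly the matching indices
theorem pv_foldB (xs : List (Int × Int)) (m : Int) (acc : List Int) :
    xs.foldl (fun acc p => if p.2 = m then acc ++ [p.1] else acc) acc
      = acc ++ (xs.filter (fun p => p.2 = m)).map (fun p => p.1) := by
  induction xs generalizing acc with
  | nil => simp
  | cons hd tl ih =>
    simp only [List.foldl_cons, List.filter_cons]
    by_cases h : hd.2 = m
    · simp [h, ih]
    · simp [h, ih]

-- enumerate commutes with map on the payload
theorem pv_enumerate_map (f : List (Int × Int × Int) → Int) (xs : List (List (Int × Int × Int))) (s : Int) :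
    PySem.List.enumerate (xs.map f) s
      = (PySem.List.enumerate xs s).map (fun p => (p.1, f p.2)) := by
  induction xs generalizing s with
  | nil => simp [PySem.List.enumerate_nil]
  | cons h t ih => simp [PySem.List.enumerate_cons, ih]

-- ===== VERDICT =====
theorem find_lowest_acc_spec : Claim_equal_find_lowest_acc := by
  intro pl _ hpre
  obtain ⟨hne, -⟩ := hpre
  match pl, hne with
  | h :: t, _ =>
  unfold Spec_find_lowest_acc find_lowest_acc find_lowest_acc_alt
  simp only [PySem.List.pyGet?_zero_cons, Option.getD_some]
  have hA : (fun (st : Int × List Int) (ip : Int × List (Int × Int × Int)) =>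
      if pvManDist ip.2 = st.1 then (st.1, st.2 ++ [ip.1])
      else if pvManDist ip.2 < st.1 then (pvManDist ip.2, [ip.1]) else st)
      = fun st ip => pvStep st (ip.1, pvManDist ip.2) := by
    funext st ip; simp [pvStep]
  rw [hA]
  rw [show (fun (st : Int × List Int) (ip : Int × List (Int × Int × Int)) => pvStep st (ip.1, pvManDist ip.2))
      = fun st ip => pvStep st ((fun p => (p.1, pvManDist p.2)) ip) from rfl]
  rw [← List.foldl_map]
  rw [← pv_enumerate_map pvManDist (h :: t) 0]
  rw [pvStep_foldl, pv_foldB]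
  rw [List.map_cons, PySem.List.min?_id_cons, Option.getD_some]
  have hsnd : (PySem.List.enumerate (pvManDist h :: List.map pvManDist t) 0).map (fun p => p.2)
      = pvManDist h :: List.map pvManDist t := PySem.List.map_snd_enumerate _ _
  have hM : List.foldl (fun m p => min m p.2) (pvManDist h)
        (PySem.List.enumerate (pvManDist h :: List.map pvManDist t) 0)
      = List.foldl min (pvManDist h) (List.map pvManDist t) := by
    rw [← List.foldl_map, hsnd]
    simp
  rw [hM, ite_self, List.nil_append]
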